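-- pv_equiv track=rewrite | github.com/398494308/Quant-test-2 | src/research_v2/strategy_code.py | param_family_for_key
-- ===== SOURCE A (Python) =====
-- def param_family_for_key(param_key: str) -> str:
--     key = str(param_key).strip().lower()
--     if not key:
--         return "unknown"
--     if any(token in key for token in ("trade_count", "taker", "flow")):
--         return "flow"
--     for prefix in (
--         "breakout",
--         "breakdown",
--         "intraday",
--         "hourly",
--         "fourh",
--         "launch",
--         "long",
--         "short",
--         "macd",
--     ):
--         if key.startswith(prefix + "_") or key == prefix:
--             return prefix
--     return key.split("_", 1)[0]
-- ===== SOURCE B (Python) =====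
-- def param_family_for_key(param_key: str) -> str:
--     # The 9-prefix loop in the original is redundant: a match on prefix plus underscore at
--     # the start (or whole-string equality) returns exactly the first
--     # underscore-delimited token, which is what the final split fallback returns too.
--     key = str(param_key).strip().lower()
--     if not key:
--         return "unknown"
--     if any(token in key for token in ("trade_count", "taker", "flow")):
--         return "flow"
--     return key.split("_", 1)[0]
-- ===== Notes on version B (the rewrite author's own statement) =====
-- stated objective: simpler
-- what changed: Dropped the 9-prefix scan entirely: matching prefix plus underscore at the start (or whole-key equality) always yields the first underscore-delimited token, so B returns the first underscore-delimited token directly after the empty and flow checks.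
import Mathlib
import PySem

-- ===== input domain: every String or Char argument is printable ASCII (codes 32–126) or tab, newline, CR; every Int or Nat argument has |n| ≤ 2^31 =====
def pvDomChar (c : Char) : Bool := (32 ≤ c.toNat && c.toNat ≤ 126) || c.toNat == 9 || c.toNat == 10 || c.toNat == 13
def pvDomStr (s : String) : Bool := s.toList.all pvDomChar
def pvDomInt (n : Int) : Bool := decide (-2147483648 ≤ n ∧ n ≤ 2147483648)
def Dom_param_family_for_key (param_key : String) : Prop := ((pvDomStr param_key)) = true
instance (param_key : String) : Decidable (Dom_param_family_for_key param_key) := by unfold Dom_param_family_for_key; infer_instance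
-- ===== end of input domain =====

-- B drops A's redundant 9-prefix loop and returns the first '_'-delimited token directly (simpler).

-- ===== PORT A =====
def param_family_for_key (param_key : String) : String :=
  let key := PySem.Str.lower (PySem.Str.strip param_key)
  if key == "" then "unknown"
  else if (["trade_count", "taker", "flow"] : List String).any (fun token => PySem.Str.isIn token key) then "flow"
  else
    -- the for-loop with early return over the 9 prefixes
    match (["breakout", "breakdown", "intraday", "hourly", "fourh", "launch",
            "long", "short", "macd"] : List String).find?
            (fun p => PySem.Str.startswith key (p ++ "_") || key == p) with
    | some p => p
    | none => ((PySem.Str.splitMax? key "_" 1).getD []).headD ""  -- key.split("_", 1)[0]; split of nonempty key with nonempty sep is always a nonempty list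

-- ===== PORT B =====
def param_family_for_key_alt (param_key : String) : String :=
  let key := PySem.Str.lower (PySem.Str.strip param_key)
  if key == "" then "unknown"
  else if (["trade_count", "taker", "flow"] : List String).any (fun token => PySem.Str.isIn token key) then "flow"
  else ((PySem.Str.splitMax? key "_" 1).getD []).headD ""  -- key.split("_", 1)[0]

-- ===== PRECONDITION & SPEC =====
def Spec_param_family_for_key (param_key : String) (out : String) : Prop := out = param_family_for_key_alt param_key
instance (param_key : String) (out : String) : Decidable (Spec_param_family_for_key param_key out) := by unfold Spec_param_family_for_key; infer_instance

-- ===== CLAIM (what is proved, stated in full; the proofs are below) =====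
def Claim_equal_param_family_for_key : Prop := ∀ (param_key : String), Dom_param_family_for_key param_key → Spec_param_family_for_key param_key (param_family_for_key param_key)

-- ===== LEMMAS AND PROOFS =====

-- once maxsplit is exhausted, go returns the rest as one piece
lemma go_zero (sep l cur : List Char) (acc : List (List Char)) (fuel : Nat) :
    PySem.Chars.splitOnMax.go sep fuel 0 l cur acc = ((cur.reverse ++ l) :: acc).reverse := by
  match fuel, l with
  | 0, l => rfl
  | f+1, [] => simp [PySem.Chars.splitOnMax.go]
  | f+1, c :: rest => simp [PySem.Chars.splitOnMax.go]

-- with maxsplit 1 and sep '_', the first piece is everything before the first '_'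
lemma go_one_head (l : List Char) (cur : List Char) (fuel : Nat) (h : l.length < fuel) :
    ∃ rest, PySem.Chars.splitOnMax.go ['_'] fuel 1 l cur [] =
      (cur.reverse ++ l.takeWhile (· ≠ '_')) :: rest := by
  induction l generalizing fuel cur with
  | nil =>
    match fuel, h with
    | f+1, _ => exact ⟨[], by simp [PySem.Chars.splitOnMax.go]⟩
  | cons c t ih =>
    match fuel, h with
    | f+1, h =>
      by_cases hc : c = '_'
      · subst hc
        refine ⟨[('_' :: t).drop 1], ?_⟩
        simp [PySem.Chars.splitOnMax.go, List.isPrefixOf, go_zero]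
      · have hc' : ¬'_' = c := fun he => hc he.symm
        have ht : t.length < f := by simpa using Nat.lt_of_succ_lt_succ h
        obtain ⟨rest, hrest⟩ := ih (c :: cur) f ht
        refine ⟨rest, ?_⟩
        have hpre : (['_'] : List Char).isPrefixOf (c :: t) = false := by
          simp [List.isPrefixOf, hc']
        simp [PySem.Chars.splitOnMax.go, hpre, hrest, hc]
lemma first_piece (key : String) :
    ((PySem.Str.splitMax? key "_" 1).getD []).headD "" =
      String.ofList (key.toList.takeWhile (· ≠ '_')) := by
  obtain ⟨rest, hrest⟩ := go_one_head key.toList [] (key.length + 1) (by simp)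
  simp only [PySem.Str.splitMax?, PySem.Chars.splitMax?, PySem.Chars.splitOnMax]
  norm_num
  rw [show ("_".toList) = ['_'] from rfl, hrest]
  simp

lemma takeWhile_no_underscore (a : List Char) (h : '_' ∉ a) : a.takeWhile (· ≠ '_') = a := by
  induction a with
  | nil => rfl
  | cons c t ih =>
    simp only [List.mem_cons, not_or] at h
    rw [List.takeWhile_cons_of_pos (by simpa using fun he : c = '_' => h.1 he.symm), ih h.2]

lemma takeWhile_prefix_underscore (a t : List Char) (h : '_' ∉ a) :
    (a ++ '_' :: t).takeWhile (· ≠ '_') = a := by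
  induction a with
  | nil => simp
  | cons c s ih =>
    simp only [List.mem_cons, not_or] at h
    rw [List.cons_append, List.takeWhile_cons_of_pos (by simpa using fun he : c = '_' => h.1 he.symm),
      ih h.2]

-- a matched prefix IS the first '_'-delimited token
lemma matched_prefix_is_first_piece (key p : String) (hp : '_' ∉ p.toList)
    (h : (PySem.Str.startswith key (p ++ "_") || key == p) = true) :
    ((PySem.Str.splitMax? key "_" 1).getD []).headD "" = p := by
  rw [first_piece]
  rcases Bool.or_eq_true_iff.mp h with h1 | h2
  · have hpre : (p ++ "_").toList <+: key.toList := by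
      have := PySem.Chars.startswith_iff (s := key.toList) (p := (p ++ "_").toList)
      simp only [PySem.Str.startswith_eq] at h1 ⊢
      exact this.mp h1
    obtain ⟨t, ht⟩ := hpre
    have hlist : key.toList = p.toList ++ '_' :: t := by
      simpa [String.toList_append] using ht.symm
    rw [hlist, takeWhile_prefix_underscore _ _ hp]
    simp [String.ofList]
  · have : key = p := by simpa using h2
    subst this
    rw [takeWhile_no_underscore _ hp]
    simp [String.ofList]

-- ===== VERDICT (by name: the statement is the Claim_ definition above) =====
theorem param_family_for_key_spec : Claim_equal_param_family_for_key := by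
  intro param_key _
  unfold Spec_param_family_for_key param_family_for_key param_family_for_key_alt
  set key := PySem.Str.lower (PySem.Str.strip param_key) with hkey
  by_cases h0 : (key == "") = true
  · rw [if_pos h0, if_pos h0]
  · rw [if_neg h0, if_neg h0]
    by_cases h1 : ((["trade_count", "taker", "flow"] : List String).any (fun token => PySem.Str.isIn token key)) = true
    · rw [if_pos h1, if_pos h1]
    · rw [if_neg h1, if_neg h1]
      cases hfind : (["breakout", "breakdown", "intraday", "hourly", "fourh", "launch",
            "long", "short", "macd"] : List String).find?
            (fun p => PySem.Str.startswith key (p ++ "_") || key == p) with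
      | none => rfl
      | some p =>
        have hmem := List.mem_of_find?_eq_some hfind
        have hpred := List.find?_some hfind
        have hp : '_' ∉ p.toList := by
          fin_cases hmem <;> decide
        exact (matched_prefix_is_first_piece key p hp hpred).symm
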